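-- pv_equiv track=rewrite | github.com/rubelw/OSSS | src/OSSS/ai/agents/query_data/handlers/data_quality_issues_handler.py | _select_data_quality_issues_fields
-- ===== SOURCE A (Python) =====
-- from typing import Any, Dict, List, Sequence
--
-- def _select_data_quality_issues_fields(
--     rows: Sequence[Dict[str, Any]],
-- ) -> List[str]:
--     if not rows:
--         return []
--
--     preferred_order = [
--         "id",
--         "source_system",
--         "table_name",
--         "record_id",
--         "field_name",
--         "issue_type",            # missing, invalid, duplicate, etc.
--         "severity",              # low, medium, high, critical
--         "category",              # enrollment, attendance, grades, etc.
--         "description",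
--         "detected_at",
--         "resolved_at",
--         "resolution_status",     # open, in_progress, resolved, wont_fix
--         "resolution_notes",
--         "assignee_id",
--         "assignee_name",
--         "school_id",
--         "school_name",
--         "created_at",
--         "updated_at",
--     ]
--
--     all_keys: List[str] = []
--     for r in rows:
--         for k in r.keys():
--             if k not in all_keys:
--                 all_keys.append(k)
--
--     ordered = [k for k in preferred_order if k in all_keys]
--     ordered.extend([k for k in all_keys if k not in ordered])
--     return ordered
-- ===== SOURCE B (Python) =====
-- from typing import Any, Dict, List, Sequence
--
-- def _select_data_quality_issues_fields(
--     rows: Sequence[Dict[str, Any]],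
-- ) -> List[str]:
--     if not rows:
--         return []
--
--     preferred_order = [
--         "id",
--         "source_system",
--         "table_name",
--         "record_id",
--         "field_name",
--         "issue_type",
--         "severity",
--         "category",
--         "description",
--         "detected_at",
--         "resolved_at",
--         "resolution_status",
--         "resolution_notes",
--         "assignee_id",
--         "assignee_name",
--         "school_id",
--         "school_name",
--         "created_at",
--         "updated_at",
--     ]
--
--     rank = {k: i for i, k in enumerate(preferred_order)}
--     npref = len(preferred_order)
--
--     pos: dict = {}
--     for r in rows:
--         for k in r.keys():
--             if k not in pos:
--                 pos[k] = len(pos)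
--
--     return sorted(pos, key=lambda k: rank.get(k, npref + pos[k]))
-- ===== Notes on version B (the rewrite author's own statement) =====
-- stated objective: faster
-- what changed: Replaces A's quadratic membership-list dedup and two output filter passes by a dict recording each key's first-appearance index plus a single stable sort keyed by preferred-rank-or-appearance.
import Mathlib
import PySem

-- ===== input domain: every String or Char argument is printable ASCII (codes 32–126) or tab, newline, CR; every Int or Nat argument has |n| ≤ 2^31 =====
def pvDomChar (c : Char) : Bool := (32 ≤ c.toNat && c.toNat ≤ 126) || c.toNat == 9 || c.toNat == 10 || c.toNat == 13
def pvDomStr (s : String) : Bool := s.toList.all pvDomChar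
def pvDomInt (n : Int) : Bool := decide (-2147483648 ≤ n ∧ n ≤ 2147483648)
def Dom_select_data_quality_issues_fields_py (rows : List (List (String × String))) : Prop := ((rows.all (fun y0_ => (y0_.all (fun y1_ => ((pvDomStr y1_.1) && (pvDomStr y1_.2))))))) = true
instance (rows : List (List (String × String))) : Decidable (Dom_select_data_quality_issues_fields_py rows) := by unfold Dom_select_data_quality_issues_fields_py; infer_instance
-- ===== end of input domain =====

-- B replaces A's quadratic membership-list building and two output passes by one ordered
-- dedup (a dict recording each key's first-appearance index) and a single stable keyed sort.


-- ===== PORT A =====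
-- the preferred_order literal (shared by both ports; both Pythons carry the same list)
def preferredOrderPy : List String :=
  ["id", "source_system", "table_name", "record_id", "field_name", "issue_type",
   "severity", "category", "description", "detected_at", "resolved_at",
   "resolution_status", "resolution_notes", "assignee_id", "assignee_name",
   "school_id", "school_name", "created_at", "updated_at"]

-- rows are Python dicts: r.keys() = first occurrences of the first components, in order
def select_data_quality_issues_fields_py (rows : List (List (String × String))) : List String :=
  if rows.isEmpty then []
  else
    let all_keys : List String :=
      rows.foldl (fun acc r =>
        (PySem.List.dedup (r.map Prod.fst)).foldl
          (fun acc k => if k ∈ acc then acc else acc ++ [k]) acc) []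
    let ordered := preferredOrderPy.filter (fun k => decide (k ∈ all_keys))
    ordered ++ all_keys.filter (fun k => !decide (k ∈ ordered))

-- ===== PORT B =====
-- rank = {k: i for i, k in enumerate(preferred_order)}
def pvRank : PySem.Dict String Int :=
  (PySem.List.enumerate preferredOrderPy 0).foldl (fun d p => d.insert p.2 p.1) PySem.Dict.empty

-- npref = len(preferred_order)
def pvNpref : Int := preferredOrderPy.length

def select_data_quality_issues_fields_py_alt (rows : List (List (String × String))) : List String :=
  if rows.isEmpty then []
  else
    -- pos[k] = len(pos) on first sight of k (dict keeps first-appearance order)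
    let pos : PySem.Dict String Int :=
      rows.foldl (fun d r =>
        (PySem.List.dedup (r.map Prod.fst)).foldl
          (fun d k => if d.contains k then d else d.insert k (d.size : Int)) d) PySem.Dict.empty
    -- sorted(pos, key=lambda k: rank.get(k, npref + pos[k]))
    PySem.List.sorted pos.keys (fun k => pvRank.getD k (pvNpref + pos.getD k 0))

-- ===== PRECONDITION & SPEC =====
def Spec_select_data_quality_issues_fields_py (rows : List (List (String × String))) (out : List String) : Prop := out = select_data_quality_issues_fields_py_alt rows
instance (rows : List (List (String × String))) (out : List String) : Decidable (Spec_select_data_quality_issues_fields_py rows out) := by unfold Spec_select_data_quality_issues_fields_py; infer_instance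

-- ===== CLAIM (what is proved, stated in full; the proofs are below) =====
def Claim_equal_select_data_quality_issues_fields_py : Prop := ∀ (rows : List (List (String × String))), Dom_select_data_quality_issues_fields_py rows → Spec_select_data_quality_issues_fields_py rows (select_data_quality_issues_fields_py rows)

-- ===== LEMMAS AND PROOFS =====

-- a Nodup list is strictly increasing under its own idxOf
theorem pvPairwiseIdxOf {l : List String} (h : l.Nodup) :
    l.Pairwise (fun a b => l.idxOf a < l.idxOf b) := by
  induction l with
  | nil => exact List.Pairwise.nil
  | cons x t ih =>
    rcases List.nodup_cons.mp h with ⟨hx, ht⟩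
    refine List.Pairwise.cons ?_ ?_
    · intro b hb
      have hbx : b ≠ x := fun e => hx (e ▸ hb)
      simp [Ne.symm hbx]
    · exact (ih ht).imp_of_mem (fun {a b} ha hb hr => by
        have hax : a ≠ x := fun e => hx (e ▸ ha)
        have hbx : b ≠ x := fun e => hx (e ▸ hb)
        simpa [Ne.symm hax, Ne.symm hbx] using Nat.succ_lt_succ hr)

-- invariant linking A's all_keys accumulator with B's pos dict
def pvInv (acc : List String) (d : PySem.Dict String Int) : Prop :=
  d.items = acc.zipIdx.map (fun p => (p.1, (p.2 : Int))) ∧ acc.Nodup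

theorem pvInv_keys {acc : List String} {d : PySem.Dict String Int} (h : pvInv acc d) :
    d.keys = acc := by
  show d.items.map Prod.fst = acc
  rw [h.1, List.map_map]
  have : ((fun p : String × Int => p.1) ∘ fun p : String × Nat => (p.1, (p.2 : Int)))
      = Prod.fst := rfl
  rw [this]
  exact List.zipIdx_map_fst 0 acc

theorem pvInv_step {acc : List String} {d : PySem.Dict String Int} (h : pvInv acc d)
    (k : String) :
    pvInv (if k ∈ acc then acc else acc ++ [k])
      (if d.contains k then d else d.insert k (d.size : Int)) := by
  have hc : d.contains k = decide (k ∈ acc) := by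
    rw [PySem.Dict.contains_eq_decide_mem_keys, pvInv_keys h]
  by_cases hm : k ∈ acc
  · simp [hm, hc]
    exact h
  · have hc' : d.contains k = false := by simp [hc, hm]
    have hsize : d.size = acc.length := by
      show d.items.length = acc.length
      rw [h.1]; simp
    simp only [hm, if_false, hc', Bool.false_eq_true]
    constructor
    · rw [PySem.Dict.items_insert_of_not_contains d _ hc', h.1, hsize,
        List.zipIdx_append, List.map_append]
      simp [List.zipIdx]
    · simp [List.nodup_append, h.2]
      exact fun a ha e => hm (e ▸ ha)

theorem pvInv_fold (ks : List String) {acc : List String} {d : PySem.Dict String Int}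
    (h : pvInv acc d) :
    pvInv (ks.foldl (fun acc k => if k ∈ acc then acc else acc ++ [k]) acc)
      (ks.foldl (fun d k => if d.contains k then d else d.insert k (d.size : Int)) d) := by
  induction ks generalizing acc d with
  | nil => exact h
  | cons x t ih => exact ih (pvInv_step h x)

theorem pvInv_rows (rows : List (List (String × String))) {acc : List String}
    {d : PySem.Dict String Int} (h : pvInv acc d) :
    pvInv
      (rows.foldl (fun acc r =>
        (PySem.List.dedup (r.map Prod.fst)).foldl
          (fun acc k => if k ∈ acc then acc else acc ++ [k]) acc) acc)
      (rows.foldl (fun d r =>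
        (PySem.List.dedup (r.map Prod.fst)).foldl
          (fun d k => if d.contains k then d else d.insert k (d.size : Int)) d) d) := by
  induction rows generalizing acc d with
  | nil => exact h
  | cons r t ih => exact ih (pvInv_fold _ h)

theorem pvInv_getD {acc : List String} {d : PySem.Dict String Int} (h : pvInv acc d)
    {k : String} (hk : k ∈ acc) : d.getD k 0 = (acc.idxOf k : Int) := by
  have hi : acc.idxOf k < acc.length := List.idxOf_lt_length_of_mem hk
  have hiz : acc.idxOf k < acc.zipIdx.length := by simpa using hi
  have hmemz : (k, acc.idxOf k) ∈ acc.zipIdx := by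
    have := List.getElem_zipIdx (l := acc) (j := 0) hiz
    rw [List.getElem_idxOf hi, Nat.zero_add] at this
    exact this ▸ List.getElem_mem hiz
  have hmem : (k, (acc.idxOf k : Int)) ∈ d.items := by
    rw [h.1]
    exact List.mem_map.mpr ⟨(k, acc.idxOf k), hmemz, rfl⟩
  have hnd : d.keys.Nodup := by rw [pvInv_keys h]; exact h.2
  exact PySem.Dict.getD_of_mem_items d hmem hnd 0

-- pvRank facts
theorem pvRank_items :
    pvRank.items = (PySem.List.enumerate preferredOrderPy 0).map (fun p => (p.2, p.1)) := by
  have := PySem.Dict.items_foldl_insert_fresh (PySem.List.enumerate preferredOrderPy 0)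
    (fun p => p.2) (fun p => p.1) PySem.Dict.empty
    (by intro a _; rfl)
    (by rw [show (fun p : Int × String => p.2) = (fun p : Int × String => p.2) from rfl,
          PySem.List.map_snd_enumerate]; decide)
  simpa [pvRank] using this

theorem pvRank_keys : pvRank.keys = preferredOrderPy := by
  show pvRank.items.map Prod.fst = preferredOrderPy
  rw [pvRank_items, List.map_map]
  exact PySem.List.map_snd_enumerate preferredOrderPy 0

theorem pvRank_getD_of_mem {k : String} (hk : k ∈ preferredOrderPy) (d0 : Int) :
    pvRank.getD k d0 = (preferredOrderPy.idxOf k : Int) := by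
  have hi : preferredOrderPy.idxOf k < preferredOrderPy.length :=
    List.idxOf_lt_length_of_mem hk
  have hmem : (k, (preferredOrderPy.idxOf k : Int)) ∈ pvRank.items := by
    rw [pvRank_items]
    refine List.mem_map.mpr ⟨((preferredOrderPy.idxOf k : Int), k), ?_, rfl⟩
    exact (PySem.List.mem_enumerate_iff _ _ _).mpr
      ⟨preferredOrderPy.idxOf k, hi, by rw [List.getElem_idxOf hi]; simp⟩
  have hnd : pvRank.keys.Nodup := by rw [pvRank_keys]; decide
  exact PySem.Dict.getD_of_mem_items pvRank hmem hnd d0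

theorem pvRank_getD_of_not_mem {k : String} (hk : k ∉ preferredOrderPy) (d0 : Int) :
    pvRank.getD k d0 = d0 := by
  refine PySem.Dict.getD_of_not_contains pvRank d0 ?_
  rw [PySem.Dict.contains_eq_decide_mem_keys, pvRank_keys]
  simpa using hk

-- ===== VERDICT (by name: the statement is the Claim_ definition above) =====
theorem select_data_quality_issues_fields_py_spec : Claim_equal_select_data_quality_issues_fields_py := by
  intro rows _
  unfold Spec_select_data_quality_issues_fields_py
  unfold select_data_quality_issues_fields_py select_data_quality_issues_fields_py_alt
  by_cases hne : rows.isEmpty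
  · simp [hne]
  · simp only [hne, if_false, Bool.false_eq_true]
    set all := rows.foldl (fun acc r =>
        (PySem.List.dedup (r.map Prod.fst)).foldl
          (fun acc k => if k ∈ acc then acc else acc ++ [k]) acc) [] with hall
    set pos := rows.foldl (fun d r =>
        (PySem.List.dedup (r.map Prod.fst)).foldl
          (fun d k => if d.contains k then d else d.insert k (d.size : Int)) d)
        PySem.Dict.empty with hpos
    have hInv : pvInv all pos := pvInv_rows rows ⟨rfl, List.nodup_nil⟩
    have hkeys : pos.keys = all := pvInv_keys hInv
    have hnd : all.Nodup := hInv.2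
    have hprefnd : preferredOrderPy.Nodup := by decide
    set key : String → Int := fun k => pvRank.getD k (pvNpref + pos.getD k 0) with hkey
    set ordered := preferredOrderPy.filter (fun k => decide (k ∈ all)) with hord
    -- key values
    have hkey_pref : ∀ k ∈ ordered, key k = (preferredOrderPy.idxOf k : Int) := by
      intro k hk
      exact pvRank_getD_of_mem (List.mem_filter.mp hk).1 _
    have hmem_ord : ∀ k, k ∈ ordered ↔ k ∈ preferredOrderPy ∧ k ∈ all := by
      intro k; rw [hord, List.mem_filter]; simp
    set rest := all.filter (fun k => !decide (k ∈ ordered)) with hrest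
    have hrest_eq : rest = all.filter (fun k => !decide (k ∈ preferredOrderPy)) := by
      rw [hrest]
      refine List.filter_congr ?_
      intro x hx
      have : x ∈ ordered ↔ x ∈ preferredOrderPy := by
        rw [hmem_ord]; exact ⟨fun h => h.1, fun h => ⟨h, hx⟩⟩
      simp [this]
    have hkey_rest : ∀ k ∈ rest, k ∈ all ∧ key k = pvNpref + (all.idxOf k : Int) := by
      intro k hk
      rw [hrest_eq] at hk
      rcases List.mem_filter.mp hk with ⟨hka, hknp⟩
      have hknp' : k ∉ preferredOrderPy := by simpa using hknp
      refine ⟨hka, ?_⟩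
      show pvRank.getD k (pvNpref + pos.getD k 0) = pvNpref + (all.idxOf k : Int)
      rw [pvRank_getD_of_not_mem hknp', pvInv_getD hInv hka]
    -- permutation
    have hperm : (ordered ++ rest).Perm all := by
      have h1 : ordered.Perm (all.filter (fun k => decide (k ∈ preferredOrderPy))) := by
        rw [List.perm_ext_iff_of_nodup (hprefnd.filter _) (hnd.filter _)]
        intro a
        rw [hmem_ord, List.mem_filter]
        simp [and_comm]
      have h2 := List.filter_append_perm (fun k => decide (k ∈ preferredOrderPy)) all
      rw [hrest_eq]
      exact (h1.append (List.Perm.refl _)).trans h2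
    -- pairwise
    have hpair : (ordered ++ rest).Pairwise (fun a b => key a < key b) := by
      rw [List.pairwise_append]
      refine ⟨?_, ?_, ?_⟩
      · refine ((pvPairwiseIdxOf hprefnd).filter _).imp_of_mem ?_
        intro a b ha hb hr
        rw [hkey_pref a ha, hkey_pref b hb]
        exact_mod_cast hr
      · refine ((pvPairwiseIdxOf hnd).filter _).imp_of_mem ?_
        intro a b ha hb hr
        rw [(hkey_rest a ha).2, (hkey_rest b hb).2]
        have : (all.idxOf a : Int) < (all.idxOf b : Int) := by exact_mod_cast hr
        omega
      · intro a ha b hb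
        have h1 := hkey_pref a ha
        have h2 := (hkey_rest b hb).2
        have hlt : preferredOrderPy.idxOf a < preferredOrderPy.length :=
          List.idxOf_lt_length_of_mem (hmem_ord a |>.mp ha).1
        have hge : (0 : Int) ≤ (all.idxOf b : Int) := Int.natCast_nonneg _
        have hnp : pvNpref = (preferredOrderPy.length : Int) := rfl
        rw [h1, h2, hnp]
        omega
    rw [hkeys]
    exact (PySem.List.sorted_eq_of_perm_of_pairwise_lt all (ordered ++ rest) key hperm hpair).symm
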